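-- pv_equiv track=rewrite | github.com/Y0ung99/algorithm | D3_최대상금.py | box
-- ===== SOURCE A (Python) =====
-- def change(numbers, a, b):
--     temp = numbers[a]
--     numbers[a] = numbers[b]
--     numbers[b] = temp
--     return numbers
--
-- def box(numbers, per, v, ex):
--     if v == ex:
--         return numbers
--     else:
--         temp = []
--         for n in numbers:
--             for p in per:
--                 temp.append(change(n[:], p[0], p[1]))
--         return box(temp[:], per, v+1, ex)
-- ===== SOURCE B (Python) =====
-- def box(numbers, per, v, ex):
--     # One pass over the k-fold swap sequences (k = ex - v): each output row is
--     # an input row with one whole sequence of swaps applied, instead of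
--     # regenerating every intermediate generation of arrays.
--     k = ex - v
--     if k == 0 or not numbers:
--         return numbers
--     all_seqs = [[]]
--     for _ in range(k):
--         all_seqs = [[p] + rest for p in per for rest in all_seqs]
--     out = []
--     for n in numbers:
--         for seq in all_seqs:
--             row = n[:]
--             for a, b in seq:
--                 row[a], row[b] = row[b], row[a]
--             out.append(row)
--     return out
-- ===== Notes on version B (the rewrite author's own statement) =====
-- stated objective: alternative
-- what changed: Instead of A's recursion that rebuilds every intermediate generation of arrays, B enumerates the list of k-fold swap sequences (k = ex - v) once and, in a single pass, applies each whole sequence to each input row.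
import Mathlib
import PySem

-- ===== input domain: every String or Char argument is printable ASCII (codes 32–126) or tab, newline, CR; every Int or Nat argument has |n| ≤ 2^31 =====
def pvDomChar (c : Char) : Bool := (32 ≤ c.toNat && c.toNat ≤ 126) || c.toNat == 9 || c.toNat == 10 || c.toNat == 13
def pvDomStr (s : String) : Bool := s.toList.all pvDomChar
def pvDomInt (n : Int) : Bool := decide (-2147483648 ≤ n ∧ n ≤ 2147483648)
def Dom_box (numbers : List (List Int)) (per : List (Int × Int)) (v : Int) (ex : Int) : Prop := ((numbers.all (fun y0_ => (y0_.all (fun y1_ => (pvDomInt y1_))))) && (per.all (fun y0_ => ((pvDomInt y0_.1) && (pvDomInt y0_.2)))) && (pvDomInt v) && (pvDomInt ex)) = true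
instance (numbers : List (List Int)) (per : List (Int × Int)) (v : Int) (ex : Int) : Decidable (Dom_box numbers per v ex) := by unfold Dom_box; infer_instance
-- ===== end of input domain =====

-- B enumerates the k-fold swap sequences once and applies each whole sequence to each
-- input row in one pass, instead of A's generation-by-generation recursion (objective: alternative).


-- ===== PORT A =====
-- change(numbers, a, b): temp = numbers[a]; numbers[a] = numbers[b]; numbers[b] = temp
-- (none = IndexError, excluded by Pre_)
def change (numbers : List Int) (a b : Int) : Option (List Int) :=
  match PySem.List.pyGet? numbers a with
  | none => none
  | some temp =>
    match PySem.List.pyGet? numbers b with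
    | none => none
    | some nb =>
      match PySem.List.pySet? numbers a nb with
      | none => none
      | some n1 => PySem.List.pySet? n1 b temp

-- the body of A's else branch: temp = []; for n in numbers: for p in per: temp.append(change(n[:], p[0], p[1]))
def stepA (numbers : List (List Int)) (per : List (Int × Int)) : List (List Int) :=
  numbers.foldl (fun temp n =>
    per.foldl (fun temp p => temp ++ [(change n p.1 p.2).getD []]) temp) []

-- Python recurses forever (RecursionError) when v > ex; the final 'else []' branch only makes
-- the port total there — such inputs are outside Pre_.
def box (numbers : List (List Int)) (per : List (Int × Int)) (v : Int) (ex : Int) : List (List Int) :=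
  if v = ex then numbers
  else if _h : v < ex then box (stepA numbers per) per (v + 1) ex
  else []
termination_by (ex - v).toNat
decreasing_by omega

-- ===== PORT B =====
-- row[a], row[b] = row[b], row[a]; the fallthrough returns row only to be total where
-- Python raises IndexError (outside Pre_)
def swapB (row : List Int) (a b : Int) : List Int :=
  match PySem.List.pyGet? row a, PySem.List.pyGet? row b with
  | some x, some y => PySem.List.pySetD (PySem.List.pySetD row a y) b x
  | _, _ => row

-- all_seqs after j iterations of: all_seqs = [[p] + rest for p in per for rest in all_seqs]
def seqsB (per : List (Int × Int)) : Nat → List (List (Int × Int))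
  | 0 => [[]]
  | j + 1 => per.flatMap (fun p => (seqsB per j).map (fun rest => p :: rest))

-- for a, b in seq: row[a], row[b] = row[b], row[a]
def applySeq (n : List Int) (seq : List (Int × Int)) : List Int :=
  seq.foldl (fun row p => swapB row p.1 p.2) n

def box_alt (numbers : List (List Int)) (per : List (Int × Int)) (v : Int) (ex : Int) : List (List Int) :=
  let k := ex - v
  if k = 0 ∨ numbers = [] then numbers   -- if k == 0 or not numbers: return numbers
  else
    let allSeqs := seqsB per k.toNat   -- k.toNat iterations = 'for _ in range(k)'
    numbers.foldl (fun out n =>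
      allSeqs.foldl (fun out seq => out ++ [applySeq n seq]) out) []

-- ===== PRECONDITION & SPEC =====
-- Pre_ excludes exactly the inputs where A raises: v > ex (unbounded recursion → RecursionError)
-- and, when at least one more round runs (v < ex), any swap index out of range for its row
-- (IndexError; row lengths never change, so validity on the input rows is validity forever).
def Pre_box (numbers : List (List Int)) (per : List (Int × Int)) (v : Int) (ex : Int) : Prop :=
  v = ex ∨ (v < ex ∧ ∀ n ∈ numbers, ∀ p ∈ per,
    PySem.Raise.InRange n.length p.1 ∧ PySem.Raise.InRange n.length p.2)
instance (numbers : List (List Int)) (per : List (Int × Int)) (v : Int) (ex : Int) : Decidable (Pre_box numbers per v ex) := by unfold Pre_box; infer_instance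

def pvWitness_box : List (List Int) × (List (Int × Int)) × Int × Int := ([[1, 2]], [(0, 1)], 0, 1)

def Spec_box (numbers : List (List Int)) (per : List (Int × Int)) (v : Int) (ex : Int) (out : List (List Int)) : Prop := out = box_alt numbers per v ex
instance (numbers : List (List Int)) (per : List (Int × Int)) (v : Int) (ex : Int) (out : List (List Int)) : Decidable (Spec_box numbers per v ex out) := by unfold Spec_box; infer_instance

-- ===== CLAIM (what is proved, stated in full; the proofs are below) =====
def Claim_equal_box : Prop := ∀ (numbers : List (List Int)) (per : List (Int × Int)) (v : Int) (ex : Int), Dom_box numbers per v ex → Pre_box numbers per v ex → Spec_box numbers per v ex (box numbers per v ex)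

-- ===== LEMMAS AND PROOFS =====

-- index validity of every per-pair on every row
def ValidRows (numbers : List (List Int)) (per : List (Int × Int)) : Prop :=
  ∀ n ∈ numbers, ∀ p ∈ per,
    PySem.Raise.InRange n.length p.1 ∧ PySem.Raise.InRange n.length p.2

theorem pyGet?_some_of_inRange (n : List Int) (a : Int)
    (ha : PySem.Raise.InRange n.length a) : ∃ x, PySem.List.pyGet? n a = some x := by
  cases h : PySem.List.pyGet? n a with
  | none => exact absurd ((PySem.List.pyGet?_eq_none_iff n a).mp h) (not_not_intro ha)
  | some x => exact ⟨x, rfl⟩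

theorem pySet?_some_of_inRange (n : List Int) (a : Int) (y : Int)
    (ha : PySem.Raise.InRange n.length a) :
    PySem.List.pySet? n a y = some (PySem.List.pySetD n a y) := by
  cases h : PySem.List.pySet? n a y with
  | none => exact absurd ((PySem.List.pySet?_eq_none_iff n a y).mp h) (not_not_intro ha)
  | some m => simp [PySem.List.pySetD, h]

theorem change_eq_swapB (n : List Int) (a b : Int)
    (ha : PySem.Raise.InRange n.length a) (hb : PySem.Raise.InRange n.length b) :
    (change n a b).getD [] = swapB n a b := by
  obtain ⟨x, hx⟩ := pyGet?_some_of_inRange n a ha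
  obtain ⟨y, hy⟩ := pyGet?_some_of_inRange n b hb
  have hb' : PySem.Raise.InRange (PySem.List.pySetD n a y).length b := by
    rw [PySem.List.length_pySetD]; exact hb
  simp [change, swapB, hx, hy, pySet?_some_of_inRange n a y ha,
    pySet?_some_of_inRange _ b x hb']

theorem length_swapB (n : List Int) (a b : Int)
    (ha : PySem.Raise.InRange n.length a) (hb : PySem.Raise.InRange n.length b) :
    (swapB n a b).length = n.length := by
  obtain ⟨x, hx⟩ := pyGet?_some_of_inRange n a ha
  obtain ⟨y, hy⟩ := pyGet?_some_of_inRange n b hb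
  simp [swapB, hx, hy, PySem.List.length_pySetD]

theorem stepA_eq (numbers : List (List Int)) (per : List (Int × Int))
    (H : ValidRows numbers per) :
    stepA numbers per = numbers.flatMap (fun n => per.map (fun p => swapB n p.1 p.2)) := by
  unfold stepA
  have h1 : numbers.foldl
      (fun temp n => per.foldl (fun temp p => temp ++ [(change n p.1 p.2).getD []]) temp) [] =
      numbers.foldl (fun temp n => temp ++ per.map (fun p => swapB n p.1 p.2)) [] := by
    apply PySem.List.foldl_congr_mem
    intro acc n hn
    rw [PySem.List.foldl_append_singleton_eq_map (fun p => (change n p.1 p.2).getD []) per acc]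
    congr 1
    apply List.map_congr_left
    intro p hp
    exact change_eq_swapB n p.1 p.2 (H n hn p hp).1 (H n hn p hp).2
  rw [h1, PySem.List.foldl_append_eq_flatMap]
  simp

theorem valid_stepA (numbers : List (List Int)) (per : List (Int × Int))
    (H : ValidRows numbers per) : ValidRows (stepA numbers per) per := by
  intro m hm p hp
  rw [stepA_eq numbers per H] at hm
  simp only [List.mem_flatMap, List.mem_map] at hm
  obtain ⟨n, hn, q, hq, rfl⟩ := hm
  rw [length_swapB n q.1 q.2 (H n hn q hq).1 (H n hn q hq).2]
  exact H n hn p hp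

theorem box_eq_flat (per : List (Int × Int)) (k : Nat) :
    ∀ (numbers : List (List Int)) (v : Int), ValidRows numbers per →
    box numbers per v (v + k) = numbers.flatMap (fun n => (seqsB per k).map (fun s => applySeq n s)) := by
  induction k with
  | zero =>
    intro numbers v _
    rw [box]
    simp [seqsB, applySeq, List.flatMap_singleton']
  | succ k ih =>
    intro numbers v H
    rw [box, if_neg (by omega : ¬ v = v + ((k + 1 : Nat) : Int)), dif_pos (by omega)]
    have hshift : v + ((k + 1 : Nat) : Int) = (v + 1) + (k : Int) := by push_cast; ring
    rw [hshift, ih (stepA numbers per) (v + 1) (valid_stepA numbers per H),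
      stepA_eq numbers per H, List.flatMap_assoc]
    congr 1
    funext n
    rw [seqsB]
    simp only [List.map_flatMap, List.flatMap_map, List.map_map]
    simp [Function.comp_def, applySeq]

theorem box_alt_eq (numbers : List (List Int)) (per : List (Int × Int)) (v ex : Int)
    (h : ex - v ≠ 0) :
    box_alt numbers per v ex = numbers.flatMap (fun n => (seqsB per (ex - v).toNat).map (fun s => applySeq n s)) := by
  rcases eq_or_ne numbers [] with rfl | hne
  · simp [box_alt]
  unfold box_alt
  simp only [if_neg (by simp [h, hne] : ¬ (ex - v = 0 ∨ numbers = []))]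
  have h1 : (fun (out : List (List Int)) n =>
      (seqsB per (ex - v).toNat).foldl (fun out seq => out ++ [applySeq n seq]) out) =
      fun out n => out ++ (seqsB per (ex - v).toNat).map (fun s => applySeq n s) := by
    funext out n
    exact PySem.List.foldl_append_singleton_eq_map _ _ _
  rw [h1, PySem.List.foldl_append_eq_flatMap]
  simp

-- ===== VERDICT (by name: the statement is the Claim_ definition above) =====
theorem box_spec : Claim_equal_box := by
  intro numbers per v ex _ hpre
  unfold Spec_box
  rcases hpre with h | ⟨hlt, H⟩
  · subst h
    rw [box, box_alt]; simp
  · have hk : ex = v + ((ex - v).toNat : Int) := by omega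
    rw [box_alt_eq numbers per v ex (by omega)]
    calc box numbers per v ex = box numbers per v (v + ((ex - v).toNat : Int)) := by rw [← hk]
      _ = _ := box_eq_flat per (ex - v).toNat numbers v H
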